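-- pv_equiv track=rewrite | github.com/Shrey-Bhandari/Intelligent-Agent-Based-Video-Asset-Retrieval-System | report_generator.py | generate_platform_analysis
-- ===== SOURCE A (Python) =====
-- from collections import defaultdict
-- from typing import List, Dict, Any
--
-- def generate_platform_analysis(records: List[Dict[str, Any]]) -> Dict[str, Dict[str, int]]:
--     """Group by platform and count success/failure."""
--     platform_stats = defaultdict(lambda: {"success": 0, "failure": 0})
--
--     for record in records:
--         platform = record.get("platform", "unknown")
--         status = record.get("status", "failure")
--         if status == "success":
--             platform_stats[platform]["success"] += 1
--         else:
--             platform_stats[platform]["failure"] += 1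
--
--     return dict(platform_stats)
-- ===== SOURCE B (Python) =====
-- from typing import List, Dict, Any
--
-- def generate_platform_analysis(records: List[Dict[str, Any]]) -> Dict[str, Dict[str, int]]:
--     """Group by platform and count success/failure, by re-scanning the records
--     once per distinct platform (group-by-filter), deriving failures by subtraction."""
--     platforms = []
--     for r in records:
--         p = r.get("platform", "unknown")
--         if p not in platforms:
--             platforms.append(p)
--     result = {}
--     for p in platforms:
--         group = [r for r in records if r.get("platform", "unknown") == p]
--         succ = len([r for r in group if r.get("status", "failure") == "success"])
--         result[p] = {"success": succ, "failure": len(group) - succ}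
--     return result
-- ===== Notes on version B (the rewrite author's own statement) =====
-- stated objective: alternative
-- what changed: A makes one pass incrementing per-platform counters in a defaultdict; B never keeps running counters: it collects the distinct platforms, then for each platform filters the record list to that platform's group, counts its successes by a filtered length, and obtains failures arithmetically as group size minus successes.
import Mathlib
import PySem

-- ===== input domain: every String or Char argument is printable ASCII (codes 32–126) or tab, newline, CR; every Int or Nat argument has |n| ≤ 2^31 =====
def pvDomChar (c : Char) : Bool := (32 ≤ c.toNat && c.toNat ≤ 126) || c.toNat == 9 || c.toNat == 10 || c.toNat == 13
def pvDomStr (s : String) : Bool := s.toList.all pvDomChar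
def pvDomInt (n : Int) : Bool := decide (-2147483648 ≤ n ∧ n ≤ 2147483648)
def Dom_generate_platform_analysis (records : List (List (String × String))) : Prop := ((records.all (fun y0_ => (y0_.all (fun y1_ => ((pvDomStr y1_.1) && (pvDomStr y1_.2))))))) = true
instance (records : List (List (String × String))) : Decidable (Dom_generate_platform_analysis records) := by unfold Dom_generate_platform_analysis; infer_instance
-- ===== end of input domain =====

-- B drops A's running defaultdict counters: it collects the distinct platforms, then
-- per platform filters the records into that group, counts successes by filtered length
-- and derives failures by subtraction; alternative decomposition (O(n*k) vs A's O(n)).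


-- ===== PORT A =====
-- the defaultdict's default value {"success": 0, "failure": 0}
def pvD0 : PySem.Dict String Int := PySem.Dict.mk [("success", 0), ("failure", 0)]

def pvStepA (d : PySem.Dict String (PySem.Dict String Int)) (r : List (String × String)) :
    PySem.Dict String (PySem.Dict String Int) :=
  let platform := (PySem.Dict.mk r).getD "platform" "unknown"
  let status := (PySem.Dict.mk r).getD "status" "failure"
  if status == "success" then
    d.modify platform pvD0 (fun m => m.modify "success" 0 (· + 1))
  else
    d.modify platform pvD0 (fun m => m.modify "failure" 0 (· + 1))

def generate_platform_analysis (records : List (List (String × String))) :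
    List (String × List (String × Int)) :=
  ((records.foldl pvStepA PySem.Dict.empty).items).map (fun kv => (kv.1, kv.2.items))

-- ===== PORT B =====
def pvPlat (r : List (String × String)) : String := (PySem.Dict.mk r).getD "platform" "unknown"

def generate_platform_analysis_alt (records : List (List (String × String))) :
    List (String × List (String × Int)) :=
  -- first loop: ordered list of distinct platforms ('if p not in platforms: platforms.append(p)')
  let platforms := records.foldl
    (fun acc r => let p := pvPlat r; if p ∈ acc then acc else acc ++ [p]) []
  -- second loop: result[p] = {"success": succ, "failure": len(group) - succ}
  let result := platforms.foldl
    (fun res p =>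
      let group := records.filter (fun r => pvPlat r == p)
      let succ : Int :=
        (group.filter (fun r => (PySem.Dict.mk r).getD "status" "failure" == "success")).length
      res.insert p [("success", succ), ("failure", (group.length : Int) - succ)])
    (PySem.Dict.empty : PySem.Dict String (List (String × Int)))
  result.items

-- ===== PRECONDITION & SPEC =====
def Spec_generate_platform_analysis (records : List (List (String × String))) (out : List (String × List (String × Int))) : Prop := out = generate_platform_analysis_alt records
instance (records : List (List (String × String))) (out : List (String × List (String × Int))) : Decidable (Spec_generate_platform_analysis records out) := by unfold Spec_generate_platform_analysis; infer_instance

-- ===== CLAIM (what is proved, stated in full; the proofs are below) =====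
def Claim_equal_generate_platform_analysis : Prop := ∀ (records : List (List (String × String))), Dom_generate_platform_analysis records → Spec_generate_platform_analysis records (generate_platform_analysis records)

-- ===== LEMMAS AND PROOFS =====

def pvFlag (r : List (String × String)) : Bool := (PySem.Dict.mk r).getD "status" "failure" == "success"

-- the inner bump on the per-platform dict, by success flag
def pvBump (m : PySem.Dict String Int) (b : Bool) : PySem.Dict String Int :=
  if b then m.modify "success" 0 (· + 1) else m.modify "failure" 0 (· + 1)

theorem pvStepA_eq (d : PySem.Dict String (PySem.Dict String Int)) (r : List (String × String)) :
    pvStepA d r = d.modify (pvPlat r) pvD0 (fun m => pvBump m (pvFlag r)) := by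
  simp only [pvStepA, pvPlat, pvFlag, pvBump]
  split <;> simp_all

theorem pvFoldA_keys (l : List (List (String × String))) :
    (l.foldl pvStepA PySem.Dict.empty).keys = PySem.List.dedup (l.map pvPlat) := by
  simp only [funext fun d => funext fun r => pvStepA_eq d r]
  rw [PySem.Dict.keys_foldl_modify_key]
  simp [PySem.Dict.keys_empty, PySem.Set.update_nil_left]

theorem pvFoldA_keys_nodup (l : List (List (String × String))) :
    (l.foldl pvStepA PySem.Dict.empty).keys.Nodup := by
  rw [pvFoldA_keys]; exact PySem.List.nodup_dedup _

-- per-key: the fold's value at p is the inner fold over the flags of p's records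
theorem pvFoldA_getD (l : List (List (String × String)))
    (d : PySem.Dict String (PySem.Dict String Int)) (p : String) :
    (l.foldl pvStepA d).getD p pvD0 =
      ((l.filter (fun r => pvPlat r == p)).map pvFlag).foldl pvBump (d.getD p pvD0) := by
  induction l generalizing d with
  | nil => rfl
  | cons r l ih =>
    simp only [List.foldl_cons, ih, pvStepA_eq, List.filter_cons]
    by_cases h : pvPlat r = p
    · subst h
      simp [PySem.Dict.getD_modify_self]
    · have hb : (pvPlat r == p) = false := by simp [h]
      rw [PySem.Dict.getD_modify]
      simp [hb, Ne.symm h]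

theorem pvBump_true (s f : Int) :
    pvBump (PySem.Dict.mk [("success", s), ("failure", f)]) true =
      PySem.Dict.mk [("success", s + 1), ("failure", f)] := by
  apply PySem.Dict.ext
  simp [pvBump, PySem.Dict.modify, PySem.Dict.items_insert, PySem.Dict.contains_mk,
    PySem.Dict.get?_mk_cons, PySem.Dict.getD_eq_get?_getD]

theorem pvBump_false (s f : Int) :
    pvBump (PySem.Dict.mk [("success", s), ("failure", f)]) false =
      PySem.Dict.mk [("success", s), ("failure", f + 1)] := by
  apply PySem.Dict.ext
  simp [pvBump, PySem.Dict.modify, PySem.Dict.items_insert, PySem.Dict.contains_mk,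
    PySem.Dict.get?_mk_cons, PySem.Dict.getD_eq_get?_getD]

-- the inner fold on a literal {"success": s, "failure": f} dict counts the flags
theorem pvBump_fold (bs : List Bool) (s f : Int) :
    bs.foldl pvBump (PySem.Dict.mk [("success", s), ("failure", f)]) =
      PySem.Dict.mk [("success", s + bs.count true), ("failure", f + bs.count false)] := by
  induction bs generalizing s f with
  | nil => simp
  | cons b bs ih =>
    cases b
    · rw [List.foldl_cons, pvBump_false, ih]
      simp; ring_nf
    · rw [List.foldl_cons, pvBump_true, ih]
      simp; ring_nf

-- B's first loop is the ordered dedup of the platforms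
theorem pvPlatforms_eq (l : List (List (String × String))) :
    l.foldl (fun acc r => let p := pvPlat r; if p ∈ acc then acc else acc ++ [p]) [] =
      PySem.List.dedup (l.map pvPlat) := by
  rw [PySem.List.dedup_eq_ofList, ← PySem.Set.update_nil_left,
    PySem.Set.update_map_eq_foldl_add]
  exact PySem.List.foldl_congr_mem _ _ _ _ (fun acc r _ => by rw [PySem.Set.add_eq_ite])

-- inserting pairwise-fresh keys appends them in order
theorem pvFoldB_items {ν : Type} (ps : List String) (f : String → ν)
    (d : PySem.Dict String ν) (hnd : ps.Nodup) (hfresh : ∀ p ∈ ps, d.contains p = false) :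
    (ps.foldl (fun res p => res.insert p (f p)) d).items = d.items ++ ps.map (fun p => (p, f p)) := by
  induction ps generalizing d with
  | nil => simp
  | cons p ps ih =>
    have hfresh' : ∀ q ∈ ps, (d.insert p (f p)).contains q = false := by
      intro q hq
      have hne : p ≠ q := by
        rintro rfl; exact (List.nodup_cons.mp hnd).1 hq
      simp [PySem.Dict.contains_insert, hfresh q (List.mem_cons_of_mem _ hq), Ne.symm hne]
    simp only [List.foldl_cons, List.map_cons]
    rw [ih (d.insert p (f p)) (List.Nodup.of_cons hnd) hfresh',
      PySem.Dict.items_insert_of_not_contains (h := hfresh p (List.mem_cons_self ..))]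
    simp

-- a Bool list's length splits into its true- and false-counts
theorem pvCount_split (bs : List Bool) : bs.count true + bs.count false = bs.length := by
  induction bs with
  | nil => rfl
  | cons b bs ih => cases b <;> simp <;> omega

-- ===== VERDICT (by name: the statement is the Claim_ definition above) =====
theorem generate_platform_analysis_spec : Claim_equal_generate_platform_analysis := by
  intro records _
  unfold Spec_generate_platform_analysis generate_platform_analysis generate_platform_analysis_alt
  rw [PySem.Dict.items_eq_map_keys _ (pvFoldA_keys_nodup records) pvD0, List.map_map,
    pvFoldA_keys, pvPlatforms_eq,
    pvFoldB_items _ _ _ (PySem.List.nodup_dedup _) (fun q _ => PySem.Dict.contains_empty q)]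
  rw [show (PySem.Dict.empty : PySem.Dict String (List (String × Int))).items = [] from rfl,
    List.nil_append]
  refine List.map_congr_left (fun p _ => ?_)
  have hget := pvFoldA_getD records PySem.Dict.empty p
  simp only [PySem.Dict.getD_empty] at hget
  simp only [pvD0] at hget ⊢
  simp only [Function.comp, hget, pvBump_fold]
  have hflt : (fun r : List (String × String) =>
      (PySem.Dict.mk r).getD "status" "failure" == "success") = pvFlag := rfl
  have hcnt : ((records.filter (fun r => pvPlat r == p)).map pvFlag).count true =
      ((records.filter (fun r => pvPlat r == p)).filter pvFlag).length := by
    rw [List.count_eq_countP, List.countP_map]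
    simp [List.countP_eq_length_filter, Function.comp]
  have hsum := pvCount_split ((records.filter (fun r => pvPlat r == p)).map pvFlag)
  rw [List.length_map] at hsum
  simp only [hflt]
  refine Prod.ext rfl ?_
  simp only [zero_add]
  rw [hcnt] at hsum
  have hcf : (↑(((records.filter (fun r => pvPlat r == p)).map pvFlag).count false) : Int) =
      ↑(records.filter (fun r => pvPlat r == p)).length -
      ↑((records.filter (fun r => pvPlat r == p)).filter pvFlag).length := by
    omega
  rw [hcnt, hcf]
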